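-- pv_equiv track=rewrite | github.com/MaxRoenco/LFA | Lab5/grammar.py | _convert_production_to_cnf
-- ===== SOURCE A (Python) =====
-- def _convert_production_to_cnf(prod, terminals, non_terminals, productions, terminal_map):
--     """
--     Convert a production to CNF format.
--
--     Args:
--         prod (str): The production to convert
--         terminals (set): Set of terminal symbols
--         non_terminals (set): Set of non-terminal symbols
--         productions (dict): Dictionary of productions
--         terminal_map (dict): Maps terminals to new non-terminals
--
--     Returns:
--         str: The converted production in CNF format
--     """
--     # Replace terminals with new non-terminals
--     symbols = []
--     for symbol in prod:
--         if symbol in terminals: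
--             if symbol not in terminal_map:
--                 new_nt = f"T_{symbol}"
--                 terminal_map[symbol] = new_nt
--                 non_terminals.add(new_nt)
--                 productions[new_nt] = [symbol]
--             symbols.append(terminal_map[symbol])
--         else:
--             symbols.append(symbol)
--
--     # If the production has only two symbols, it's already in CNF
--     if len(symbols) == 2:
--         return ''.join(symbols)
--
--     # Otherwise, create new non-terminals for groups of symbols
--     while len(symbols) > 2:
--         new_nt = f"X_{len(non_terminals)}"
--         non_terminals.add(new_nt)
--
--         # Create a new production for the last two symbols
--         last_two = ''.join(symbols[-2:])
--         productions[new_nt] = [last_two]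
--
--         # Replace the last two symbols with the new non-terminal
--         symbols = symbols[:-2] + [new_nt]
--
--     return ''.join(symbols)
-- ===== SOURCE B (Python) =====
-- def _cnf_symbol(symbol, terminals, non_terminals, productions, terminal_map):
--     """Return the CNF symbol for one character, registering T_-rules as needed."""
--     if symbol not in terminals:
--         return symbol
--     nt = terminal_map.get(symbol)
--     if nt is None:
--         nt = f"T_{symbol}"
--         terminal_map[symbol] = nt
--         non_terminals.add(nt)
--         productions[nt] = [symbol]
--     return nt
--
--
-- def _convert_production_to_cnf(prod, terminals, non_terminals, productions, terminal_map):
--     symbols = [_cnf_symbol(c, terminals, non_terminals, productions, terminal_map)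
--                for c in prod]
--     if len(symbols) <= 2:
--         return ''.join(symbols)
--     # Single reverse pass with one string accumulator instead of rebuilding
--     # the symbol list on every iteration.
--     current = symbols[-1]
--     for sym in reversed(symbols[1:-1]):
--         new_nt = f"X_{len(non_terminals)}"
--         non_terminals.add(new_nt)
--         productions[new_nt] = [sym + current]
--         current = new_nt
--     return symbols[0] + current
-- ===== Notes on version B (the rewrite author's own statement) =====
-- stated objective: faster
-- what changed: Phase 1 becomes a per-character helper used in one comprehension, and the while-loop that re-slices and rebuilds the symbol list each iteration is replaced by a single reverse pass keeping one string accumulator, so each step is O(1) instead of O(n).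
import Mathlib
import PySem

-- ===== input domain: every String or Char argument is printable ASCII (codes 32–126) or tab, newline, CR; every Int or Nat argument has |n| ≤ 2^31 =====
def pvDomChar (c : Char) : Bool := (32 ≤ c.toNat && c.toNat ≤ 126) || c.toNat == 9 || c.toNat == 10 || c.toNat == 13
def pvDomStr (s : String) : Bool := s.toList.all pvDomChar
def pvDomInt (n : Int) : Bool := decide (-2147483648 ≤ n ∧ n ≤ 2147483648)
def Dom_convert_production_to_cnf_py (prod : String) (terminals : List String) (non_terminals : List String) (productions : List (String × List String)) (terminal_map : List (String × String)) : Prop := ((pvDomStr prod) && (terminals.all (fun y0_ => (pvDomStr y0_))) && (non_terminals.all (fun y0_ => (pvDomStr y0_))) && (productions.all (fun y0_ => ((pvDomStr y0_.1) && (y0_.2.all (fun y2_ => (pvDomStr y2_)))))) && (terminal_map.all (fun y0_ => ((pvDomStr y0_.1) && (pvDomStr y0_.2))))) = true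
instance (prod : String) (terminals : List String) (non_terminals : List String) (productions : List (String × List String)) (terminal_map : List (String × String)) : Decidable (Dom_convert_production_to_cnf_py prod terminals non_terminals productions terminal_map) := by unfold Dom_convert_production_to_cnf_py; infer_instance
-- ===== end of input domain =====

-- B replaces A's quadratic while-loop (which re-slices and rebuilds the symbol list every
-- iteration) by a single reverse pass keeping one string accumulator, and phase 1 by a
-- stateful per-character helper; objective: faster (linear instead of quadratic, confirmed). Both A and B mutate
-- non_terminals / productions / terminal_map identically; the equivalence proved here is
-- about the RETURN value (the ports thread that state explicitly).

-- ===== PORT A =====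
-- state threaded by A's first loop: (symbols, non_terminals, productions, terminal_map)
def pvAStep (terminals : List String)
    (st : List String × PySem.Set String × PySem.Dict String (List String) × PySem.Dict String String)
    (c : Char) :
    List String × PySem.Set String × PySem.Dict String (List String) × PySem.Dict String String :=
  let symbols := st.1
  let nts := st.2.1
  let prods := st.2.2.1
  let tmap := st.2.2.2
  let symbol := String.singleton c
  if PySem.Set.contains terminals symbol then
    if tmap.contains symbol then
      (symbols ++ [tmap.getD symbol ""], nts, prods, tmap)
    else
      let new_nt := "T_" ++ symbol
      let tmap' := tmap.insert symbol new_nt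
      let nts' := PySem.Set.add nts new_nt
      let prods' := prods.insert new_nt [symbol]
      (symbols ++ [tmap'.getD symbol ""], nts', prods', tmap')
  else
    (symbols ++ [symbol], nts, prods, tmap)

-- A's 'while len(symbols) > 2' loop; terminates because symbols[:-2] ++ [new_nt] is shorter
def pvAWhile (symbols : List String) (nts : PySem.Set String)
    (prods : PySem.Dict String (List String)) : List String :=
  if _h : 2 < symbols.length then
    let new_nt := "X_" ++ PySem.Int.toStr (PySem.Set.len nts)
    let nts' := PySem.Set.add nts new_nt
    let last_two := PySem.Str.join "" (PySem.List.slice symbols (some (-2)) none)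
    let prods' := prods.insert new_nt [last_two]
    pvAWhile (PySem.List.slice symbols none (some (-2)) ++ [new_nt]) nts' prods'
  else symbols
termination_by symbols.length
decreasing_by
  have hs : PySem.List.slice symbols none (some (-2)) = symbols.take (symbols.length - 2) := by
    simpa using PySem.List.slice_to_neg_natCast symbols 2 (by norm_num)
  simp [hs]
  omega

def convert_production_to_cnf_py (prod : String) (terminals : List String) (non_terminals : List String) (productions : List (String × List String)) (terminal_map : List (String × String)) : String :=
  let st := prod.toList.foldl (pvAStep terminals)
      ([], non_terminals, PySem.Dict.mk productions, PySem.Dict.mk terminal_map)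
  let symbols := st.1
  if symbols.length = 2 then PySem.Str.join "" symbols
  else PySem.Str.join "" (pvAWhile symbols st.2.1 st.2.2.1)

-- ===== PORT B =====
-- Source B's _cnf_symbol: the CNF symbol for one character plus the updated state
def pvCnfSymbol (terminals : List String) (c : Char)
    (st : PySem.Set String × PySem.Dict String (List String) × PySem.Dict String String) :
    String × (PySem.Set String × PySem.Dict String (List String) × PySem.Dict String String) :=
  let symbol := String.singleton c
  if ¬ PySem.Set.contains terminals symbol then (symbol, st)
  else
    match st.2.2.get? symbol with
    | some nt => (nt, st)
    | none =>
      let nt := "T_" ++ symbol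
      (nt, (PySem.Set.add st.1 nt, st.2.1.insert nt [symbol], st.2.2.insert symbol nt))

-- Source B's list comprehension over prod (state threaded left to right)
def pvBMap (terminals : List String) (cs : List Char)
    (st : PySem.Set String × PySem.Dict String (List String) × PySem.Dict String String) :
    List String × (PySem.Set String × PySem.Dict String (List String) × PySem.Dict String String) :=
  match cs with
  | [] => ([], st)
  | c :: rest =>
    let (s, st') := pvCnfSymbol terminals c st
    let (tail, st'') := pvBMap terminals rest st'
    (s :: tail, st'')

-- Source B's 'for sym in reversed(symbols[1:-1])' accumulator pass (returns final 'current')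
def pvBChain (syms : List String) (current : String) (nts : PySem.Set String)
    (prods : PySem.Dict String (List String)) : String :=
  match syms with
  | [] => current
  | sym :: rest =>
    let new_nt := "X_" ++ PySem.Int.toStr (PySem.Set.len nts)
    pvBChain rest new_nt (PySem.Set.add nts new_nt) (prods.insert new_nt [sym ++ current])

def convert_production_to_cnf_py_alt (prod : String) (terminals : List String) (non_terminals : List String) (productions : List (String × List String)) (terminal_map : List (String × String)) : String :=
  let r := pvBMap terminals prod.toList
      (non_terminals, PySem.Dict.mk productions, PySem.Dict.mk terminal_map)
  let symbols := r.1
  if symbols.length ≤ 2 then PySem.Str.join "" symbols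
  else
    -- symbols[-1] and symbols[0]: indices always in range here (length ≥ 3), so pyGetD is exact
    let current := PySem.List.pyGetD symbols (-1) ""
    PySem.List.pyGetD symbols 0 "" ++
      pvBChain ((PySem.List.slice symbols (some 1) (some (-1))).reverse) current r.2.1 r.2.2.1

-- ===== PRECONDITION & SPEC =====
def Spec_convert_production_to_cnf_py (prod : String) (terminals : List String) (non_terminals : List String) (productions : List (String × List String)) (terminal_map : List (String × String)) (out : String) : Prop := out = convert_production_to_cnf_py_alt prod terminals non_terminals productions terminal_map
instance (prod : String) (terminals : List String) (non_terminals : List String) (productions : List (String × List String)) (terminal_map : List (String × String)) (out : String) : Decidable (Spec_convert_production_to_cnf_py prod terminals non_terminals productions terminal_map out) := by unfold Spec_convert_production_to_cnf_py; infer_instance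

-- ===== CLAIM (what is proved, stated in full; the proofs are below) =====
def Claim_equal_convert_production_to_cnf_py : Prop := ∀ (prod : String) (terminals : List String) (non_terminals : List String) (productions : List (String × List String)) (terminal_map : List (String × String)), Dom_convert_production_to_cnf_py prod terminals non_terminals productions terminal_map → Spec_convert_production_to_cnf_py prod terminals non_terminals productions terminal_map (convert_production_to_cnf_py prod terminals non_terminals productions terminal_map)

-- ===== LEMMAS AND PROOFS =====

-- ''.join of exactly two strings
theorem pvJoin_pair (s t : String) : PySem.Str.join "" [s, t] = s ++ t := by
  have h : ("" : String).toList = [] := rfl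
  simp [PySem.Str.join, h, PySem.Chars.join_cons_cons, PySem.Chars.join_singleton,
    ← String.toList_append]

-- one character: A's loop body appends exactly B's _cnf_symbol and performs the same update
theorem pvStep_eq (terminals : List String) (c : Char) (symbols : List String)
    (st : PySem.Set String × PySem.Dict String (List String) × PySem.Dict String String) :
    pvAStep terminals (symbols, st) c =
      (symbols ++ [(pvCnfSymbol terminals c st).1], (pvCnfSymbol terminals c st).2) := by
  obtain ⟨nts, prods, tmap⟩ := st
  unfold pvAStep pvCnfSymbol
  by_cases hm : String.singleton c ∈ terminals
  · rcases hg : tmap.get? (String.singleton c) with _ | nt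
    · have hc : tmap.contains (String.singleton c) = false := by
        rw [PySem.Dict.contains_eq_isSome_get?, hg]; rfl
      simp [PySem.Set.contains, hm, hc, hg, PySem.Dict.getD, PySem.Dict.get?_insert_self]
    · have hc : tmap.contains (String.singleton c) = true := by
        rw [PySem.Dict.contains_eq_isSome_get?, hg]; rfl
      simp [PySem.Set.contains, hm, hc, hg, PySem.Dict.getD]
  · simp [PySem.Set.contains, hm]

-- A's whole first loop produces B's symbol list and the same final state
theorem pvPhase1_eq (terminals : List String) (cs : List Char) (acc : List String)
    (st : PySem.Set String × PySem.Dict String (List String) × PySem.Dict String String) :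
    cs.foldl (pvAStep terminals) (acc, st) =
      (acc ++ (pvBMap terminals cs st).1, (pvBMap terminals cs st).2) := by
  induction cs generalizing acc st with
  | nil => simp [pvBMap]
  | cons c rest ih =>
    rw [List.foldl_cons, pvStep_eq]
    rw [ih]
    simp [pvBMap]

-- slice arithmetic on an explicitly decomposed symbol list
theorem pvSlice_last_two (a x y : String) (m : List String) :
    PySem.List.slice (a :: (m ++ [x, y])) (some (-2)) none = [x, y] := by
  have h := PySem.List.slice_from_neg_natCast (a :: (m ++ [x, y])) 2 (by norm_num)
  have hl : (a :: (m ++ [x, y])).length - 2 = m.length + 1 := by simp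
  have hd : (a :: (m ++ [x, y])).drop (m.length + 1) = [x, y] := by
    simp [List.drop_left']
  simpa [hl, hd] using h

theorem pvSlice_front (a x y : String) (m : List String) :
    PySem.List.slice (a :: (m ++ [x, y])) none (some (-2)) = a :: m := by
  have h := PySem.List.slice_to_neg_natCast (a :: (m ++ [x, y])) 2 (by norm_num)
  have hl : (a :: (m ++ [x, y])).length - 2 = m.length + 1 := by simp
  have ht : (a :: (m ++ [x, y])).take (m.length + 1) = a :: m := by
    simp [List.take_left']
  simpa [hl, ht] using h

theorem pvSlice_middle (a y : String) (l : List String) :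
    PySem.List.slice (a :: (l ++ [y])) (some 1) (some (-1)) = l := by
  have hlen : (a :: (l ++ [y])).length = l.length + 2 := by simp
  simp only [PySem.List.slice, PySem.List.clampIdx, hlen]
  norm_num
  have h1 : ((l.length : Int) + 2 + -1).toNat = l.length + 1 := by omega
  rw [if_neg (by omega : ¬ ((l.length : Int) + 2 < 1))]
  simp [h1, List.take_left']

-- the core: A's while-loop-then-join equals B's reverse accumulator pass
theorem pvCore (l : List String) (a y : String) (nts : PySem.Set String)
    (prods : PySem.Dict String (List String)) :
    PySem.Str.join "" (pvAWhile (a :: (l ++ [y])) nts prods) =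
      a ++ pvBChain l.reverse y nts prods := by
  induction l using List.reverseRecOn generalizing y nts prods with
  | nil =>
    rw [pvAWhile]
    simp [pvBChain, pvJoin_pair]
  | append_singleton m x ih =>
    rw [pvAWhile]
    have hlen : 2 < (a :: ((m ++ [x]) ++ [y])).length := by simp
    simp only [hlen, dif_pos]
    have hassoc : (m ++ [x]) ++ [y] = m ++ [x, y] := by simp
    rw [hassoc, pvSlice_last_two, pvSlice_front, pvJoin_pair]
    have hcons : (a :: m) ++ ["X_" ++ PySem.Int.toStr (PySem.Set.len nts)] =
        a :: (m ++ ["X_" ++ PySem.Int.toStr (PySem.Set.len nts)]) := by simp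
    rw [hcons, ih]
    simp [pvBChain]

-- ===== VERDICT (by name: the statement is the Claim_ definition above) =====
theorem convert_production_to_cnf_py_spec : Claim_equal_convert_production_to_cnf_py := by
  intro prod terminals non_terminals productions terminal_map _
  unfold Spec_convert_production_to_cnf_py
  unfold convert_production_to_cnf_py convert_production_to_cnf_py_alt
  rw [pvPhase1_eq]
  set st0 := (non_terminals, PySem.Dict.mk productions, PySem.Dict.mk terminal_map)
  set r := pvBMap terminals prod.toList st0 with hr
  obtain ⟨symbols, st⟩ := r
  simp only [List.nil_append]
  by_cases h2 : symbols.length = 2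
  · simp [h2]
  · simp only [h2, if_false]
    by_cases hgt : 2 < symbols.length
    · have hle : ¬ symbols.length ≤ 2 := by omega
      simp only [hle, if_false]
      -- decompose symbols = a :: (l ++ [y])
      obtain ⟨a, rest, hsym⟩ : ∃ a rest, symbols = a :: rest := by
        cases symbols with
        | nil => simp at hgt
        | cons a rest => exact ⟨a, rest, rfl⟩
      obtain ⟨l, y, hrest⟩ : ∃ l y, rest = l ++ [y] := by
        rcases List.eq_nil_or_concat rest with h | ⟨l, y, h⟩
        · subst h; subst hsym; simp at hgt
        · exact ⟨l, y, by simpa using h⟩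
      subst hrest; subst hsym
      rw [pvCore, pvSlice_middle]
      have hy : PySem.List.pyGetD (a :: (l ++ [y])) (-1) "" = y := by
        have : a :: (l ++ [y]) = (a :: l) ++ [y] := by simp
        rw [this, PySem.List.pyGetD_neg_one_append_singleton]
      rw [hy, PySem.List.pyGetD_zero_cons]
    · -- length < 2: the while loop does nothing on either reading
      have hle : symbols.length ≤ 2 := by omega
      rw [pvAWhile]
      simp [hgt, hle]
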